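-- pv_equiv track=rewrite | github.com/wenima/math-series | codewars/src/highest_bi_prime.py | highest_biPrimefac
-- ===== SOURCE A (Python) =====
-- def highest_biPrimefac(p1, p2, end):
--     """Return a list with the highest number with prime factors p1 and p2, the
--     exponent for the smaller prime and the exponent for the larger prime."""
--     given_primes = set([p1, p2])
--     k1 = 0
--     k2 = 0
--     highest = 0
--     for n in range(end, 0, -1):
--         pf = prime_factors(n, given_primes)
--         if given_primes == set(pf):
--             if pf.count(p1) > k1 and pf.count(p2) > k2:
--                 k1 = pf.count(p1)
--                 k2 = pf.count(p2)
--                 highest = n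
--         if (p1 ** k1) * (p2 ** k2) > n:
--             return [highest, k1, k2]
--     return None
--
-- def prime_factors(n, given_primes):
--     """Return a list with all prime factors of n."""
--     factors = []
--     if n < 2:
--         return factors
--     p = 2
--     while n >= (p * p):
--         if n % p:
--             p += 1
--         else:
--             if p not in given_primes:
--                 return []
--             n = n // p
--             factors.append(p)
--     factors.append(n)
--     return factors
-- ===== SOURCE B (Python) =====
-- def highest_biPrimefac(p1, p2, end):
--     """Return a list with the highest number <= end whose only prime factors
--     are p1 and p2, together with the exponent of p1 and the exponent of p2.
--
--     Instead of scanning every n downward and trial-factoring it, enumerate the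
--     exponent pairs (a, b) with p1**a * p2**b <= end directly.
--     """
--     if not (_is_prime(p1) and _is_prime(p2)):
--         return None
--     if p1 == p2:
--         if p1 > end:
--             return None
--         v, a = p1, 1
--         while v * p1 <= end:
--             v *= p1
--             a += 1
--         return [v, a, a]
--     best = None
--     pa, a = p1, 1
--     while pa <= end:
--         v, b = pa * p2, 1
--         while v <= end:
--             if best is None or v > best[0]:
--                 best = [v, a, b]
--             v *= p2
--             b += 1
--         pa *= p1
--         a += 1
--     return best
--
--
-- def _is_prime(n):
--     if n < 2:
--         return False
--     d = 2
--     while d * d <= n: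
--         if n % d == 0:
--             return False
--         d += 1
--     return True
-- ===== Notes on version B (the rewrite author's own statement) =====
-- stated objective: faster
-- what changed: A scans every n from end down to 1 and trial-factors each one; B primality-checks p1 and p2 once and then enumerates only the exponent pairs p1^a * p2^b <= end, tracking the maximum.
import Mathlib
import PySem

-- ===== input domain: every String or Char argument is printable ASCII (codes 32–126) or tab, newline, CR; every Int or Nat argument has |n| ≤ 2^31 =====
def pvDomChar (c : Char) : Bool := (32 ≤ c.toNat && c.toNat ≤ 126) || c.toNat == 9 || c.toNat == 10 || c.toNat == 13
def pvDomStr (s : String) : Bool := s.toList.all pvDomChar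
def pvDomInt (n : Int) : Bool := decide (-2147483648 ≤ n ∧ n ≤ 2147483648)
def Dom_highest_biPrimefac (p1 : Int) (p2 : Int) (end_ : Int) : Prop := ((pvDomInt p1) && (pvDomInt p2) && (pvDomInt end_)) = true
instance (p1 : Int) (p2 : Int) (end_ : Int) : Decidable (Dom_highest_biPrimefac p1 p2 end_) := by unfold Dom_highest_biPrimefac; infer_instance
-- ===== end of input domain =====

-- B replaces A's downward scan of every n ≤ end (each trial-factored) by a direct
-- enumeration of the exponent pairs p1^a * p2^b ≤ end after a primality pre-check
-- (objective: faster; measurably so on large `end`).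

-- ===== PORT A =====

-- the 'while n >= p*p' loop of prime_factors; 'hp : 2 ≤ p' records that the trial
-- divisor starts at 2 and only increases (used for termination only)
def pvPfLoop (p1 p2 : Int) (n p : Int) (acc : List Int) (hp : 2 ≤ p) : List Int :=
  if h : p * p ≤ n then
    if PySem.Int.mod n p ≠ 0 then
      pvPfLoop p1 p2 n (p + 1) acc (by omega)
    else
      if ¬ (p = p1 ∨ p = p2) then []       -- 'if p not in given_primes: return []'
      else pvPfLoop p1 p2 (PySem.Int.floordiv n p) p (acc ++ [p]) hp
  else acc ++ [n]
termination_by (n - p).toNat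
decreasing_by
  · have h2 : 2 * p ≤ p * p := by nlinarith
    omega
  · have h2 : 2 * p ≤ p * p := by nlinarith
    have hdiv : PySem.Int.floordiv n p = n / p := PySem.Int.floordiv_eq_ediv_of_pos (by omega)
    have hlt : n / p < n := Int.ediv_lt_of_lt_mul (by omega) (by nlinarith)
    omega

def pvPrimeFactors (p1 p2 n : Int) : List Int :=
  if n < 2 then [] else pvPfLoop p1 p2 n 2 [] (by omega)

-- the 'for n in range(end, 0, -1)' loop with state (k1, k2, highest)
def pvALoop (p1 p2 : Int) (ns : List Int) (k1 k2 highest : Int) : Option (List Int) :=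
  match ns with
  | [] => none
  | n :: rest =>
    let pf := pvPrimeFactors p1 p2 n
    let st :=
      if PySem.Set.equal (PySem.Set.ofList [p1, p2]) (PySem.Set.ofList pf) then
        if (pf.count p1 : Int) > k1 ∧ (pf.count p2 : Int) > k2 then
          ((pf.count p1 : Int), (pf.count p2 : Int), n)
        else (k1, k2, highest)
      else (k1, k2, highest)
    -- 'p1 ** k1' with k1 a count, hence ≥ 0: exact as '^ ·.toNat'
    if p1 ^ st.1.toNat * p2 ^ st.2.1.toNat > n then some [st.2.2, st.1, st.2.1]
    else pvALoop p1 p2 rest st.1 st.2.1 st.2.2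

def highest_biPrimefac (p1 : Int) (p2 : Int) (end_ : Int) : Option (List Int) :=
  pvALoop p1 p2 (PySem.List.pyRange end_ 0 (-1)) 0 0 0

-- ===== PORT B =====

-- the 'while d * d <= n' loop of _is_prime
def pvIsPrimeLoop (n d : Int) (hd : 2 ≤ d) : Bool :=
  if h : d * d ≤ n then
    if PySem.Int.mod n d = 0 then false
    else pvIsPrimeLoop n (d + 1) (by omega)
  else true
termination_by (n - d).toNat
decreasing_by
  have h2 : 2 * d ≤ d * d := by nlinarith
  omega

def pvIsPrime (n : Int) : Bool :=
  if n < 2 then false else pvIsPrimeLoop n 2 (by omega)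

-- equal-prime branch: 'while v * p <= end: v *= p; a += 1'
def pvPowLoop (p end_ v a : Int) (hp : 2 ≤ p) (hv : 1 ≤ v) : Int × Int :=
  if h : v * p ≤ end_ then pvPowLoop p end_ (v * p) (a + 1) hp (by nlinarith)
  else (v, a)
termination_by (end_ - v).toNat
decreasing_by
  have h2 : v + 1 ≤ v * p := by nlinarith
  omega

-- inner 'while v <= end' loop over the exponent of p2
def pvBInner (p2 end_ : Int) (a : Int) (v b : Int) (best : Option (List Int))
    (hp2 : 2 ≤ p2) (hv : 1 ≤ v) : Option (List Int) :=
  if h : v ≤ end_ then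
    let best' :=
      match best with
      | none => some [v, a, b]
      | some l => if v > l.headD 0 then some [v, a, b] else some l
    pvBInner p2 end_ a (v * p2) (b + 1) best' hp2 (by nlinarith)
  else best
termination_by (end_ + 1 - v).toNat
decreasing_by
  have h2 : v + 1 ≤ v * p2 := by nlinarith
  omega

-- outer 'while pa <= end' loop over the exponent of p1
def pvBOuter (p1 p2 end_ : Int) (pa a : Int) (best : Option (List Int))
    (hp1 : 2 ≤ p1) (hp2 : 2 ≤ p2) (hpa : 1 ≤ pa) : Option (List Int) :=
  if h : pa ≤ end_ then
    pvBOuter p1 p2 end_ (pa * p1) (a + 1)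
      (pvBInner p2 end_ a (pa * p2) 1 best hp2 (by nlinarith)) hp1 hp2 (by nlinarith)
  else best
termination_by (end_ + 1 - pa).toNat
decreasing_by
  have h2 : pa + 1 ≤ pa * p1 := by nlinarith
  omega

-- pvIsPrime n = true forces 2 ≤ n (needed by the loops' hypothesis arguments)
theorem pvIsPrime_two_le (n : Int) (h : pvIsPrime n = true) : 2 ≤ n := by
  unfold pvIsPrime at h
  by_contra hlt
  rw [if_pos (by omega)] at h
  exact Bool.false_ne_true h

def highest_biPrimefac_alt (p1 : Int) (p2 : Int) (end_ : Int) : Option (List Int) :=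
  if hpr : pvIsPrime p1 && pvIsPrime p2 then
    if p1 = p2 then
      if p1 > end_ then none
      else
        let va := pvPowLoop p1 end_ p1 1
          (pvIsPrime_two_le p1 (by simpa using (Bool.and_eq_true _ _ |>.mp hpr).1))
          (by have := pvIsPrime_two_le p1 (by simpa using (Bool.and_eq_true _ _ |>.mp hpr).1); omega)
        some [va.1, va.2, va.2]
    else
      pvBOuter p1 p2 end_ p1 1 none
        (pvIsPrime_two_le p1 (by simpa using (Bool.and_eq_true _ _ |>.mp hpr).1))
        (pvIsPrime_two_le p2 (by simpa using (Bool.and_eq_true _ _ |>.mp hpr).2))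
        (by have := pvIsPrime_two_le p1 (by simpa using (Bool.and_eq_true _ _ |>.mp hpr).1); omega)
  else none

-- ===== PRECONDITION & SPEC =====
def Spec_highest_biPrimefac (p1 : Int) (p2 : Int) (end_ : Int) (out : Option (List Int)) : Prop := out = highest_biPrimefac_alt p1 p2 end_
instance (p1 : Int) (p2 : Int) (end_ : Int) (out : Option (List Int)) : Decidable (Spec_highest_biPrimefac p1 p2 end_ out) := by unfold Spec_highest_biPrimefac; infer_instance

-- ===== CLAIM (what is proved, stated in full; the proofs are below) =====
def Claim_equal_highest_biPrimefac : Prop := ∀ (p1 : Int) (p2 : Int) (end_ : Int), Dom_highest_biPrimefac p1 p2 end_ → Spec_highest_biPrimefac p1 p2 end_ (highest_biPrimefac p1 p2 end_)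

-- ===== LEMMAS AND PROOFS =====


-- ℕ core: no divisor q with q*q ≤ m implies prime
theorem pvNatPrimeOfNoSqDiv (m : ℕ) (hm : 2 ≤ m)
    (h : ∀ q : ℕ, 2 ≤ q → q * q ≤ m → ¬ q ∣ m) : m.Prime := by
  by_contra hnp
  have h1 : m.minFac * m.minFac ≤ m := by
    have := Nat.minFac_sq_le_self (by omega) hnp
    simpa [pow_two] using this
  have h2 : m.minFac.Prime := Nat.minFac_prime (by omega)
  exact h m.minFac h2.two_le h1 (Nat.minFac_dvd m)

-- Int version via natAbs
theorem pvIntPrimeOfNoSqDiv (n : Int) (hn : 2 ≤ n)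
    (h : ∀ q : Int, 2 ≤ q → q * q ≤ n → ¬ q ∣ n) : Prime n := by
  rw [Int.prime_iff_natAbs_prime]
  apply pvNatPrimeOfNoSqDiv _ (by omega)
  intro q hq hsq hdvd
  have h1 : ((q : ℤ)) ∣ n := by
    have : (q : ℤ).natAbs ∣ n.natAbs := by simpa using hdvd
    exact Int.natAbs_dvd_natAbs.mp this
  have h2 : (q : ℤ) * (q : ℤ) ≤ n := by
    have : ((q * q : ℕ) : ℤ) ≤ ((n.natAbs : ℕ) : ℤ) := by exact_mod_cast hsq
    rw [Int.natAbs_of_nonneg (by omega)] at this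
    push_cast at this; exact this
  exact h q (by exact_mod_cast hq) h2 h1

-- a number ≥ 2 with no divisor in [2, p) and below p*p is prime
theorem pvIntPrimeResidual (n p : Int) (hn : 2 ≤ n) (hp : 0 ≤ p) (hnp : n < p * p)
    (hmin : ∀ q : Int, 2 ≤ q → q < p → ¬ q ∣ n) : Prime n := by
  apply pvIntPrimeOfNoSqDiv n hn
  intro q hq hsq hdvd
  have hqp : q < p := by nlinarith
  exact hmin q hq hqp hdvd

-- a number ≥ 2 with no proper divisor in [2, p) that divides something with no
-- divisors in [2, p): minimal divisor is prime
theorem pvIntPrimeOfMin (p : Int) (hp : 2 ≤ p)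
    (h : ∀ q : Int, 2 ≤ q → q < p → ¬ q ∣ p) : Prime p := by
  apply pvIntPrimeOfNoSqDiv p hp
  intro q hq hsq hdvd
  have : q < p := by nlinarith
  exact h q hq this hdvd

theorem pvPrimeDvdPrime (p q : Int) (hp2 : 2 ≤ p) (hq2 : 2 ≤ q)
    (_hp : Prime p) (hq : Prime q) (h : p ∣ q) : p = q := by
  have h1 : p.natAbs ∣ q.natAbs := Int.natAbs_dvd_natAbs.mpr h
  have h2 := (Int.prime_iff_natAbs_prime.mp hq).eq_one_or_self_of_dvd _ h1
  have hp1 : p.natAbs = p.toNat := by omega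
  have hq1 : q.natAbs = q.toNat := by omega
  omega

theorem pvPowInjExp (p : Int) (hp : 2 ≤ p) {b d : ℕ} (h : p ^ b = p ^ d) : b = d := by
  rcases lt_trichotomy b d with hlt | he | hlt
  · have := pow_lt_pow_right₀ (show (1:Int) < p by omega) hlt
    omega
  · exact he
  · have := pow_lt_pow_right₀ (show (1:Int) < p by omega) hlt
    omega

theorem pvPowPairLt (p1 p2 : Int) (hp1 : 2 ≤ p1) (hp2 : 2 ≤ p2)
    {a b a' b' : ℕ} (ha : a < a') (hb : b < b') :
    p1 ^ a * p2 ^ b < p1 ^ a' * p2 ^ b' := by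
  have hpa : (0:Int) < p1 ^ a := pow_pos (by omega) a
  have hpb : (0:Int) < p2 ^ b := pow_pos (by omega) b
  have hL : (0:Int) < p1 ^ a * p2 ^ b := mul_pos hpa hpb
  have h1 : p1 ^ (a + 1) ≤ p1 ^ a' := pow_le_pow_right₀ (by omega) (by omega)
  have h2 : p2 ^ (b + 1) ≤ p2 ^ b' := pow_le_pow_right₀ (by omega) (by omega)
  have h3 : p1 ^ a * p2 ^ b < p1 ^ (a + 1) * p2 ^ (b + 1) := by
    have : p1 ^ (a+1) * p2 ^ (b+1) = (p1 ^ a * p2 ^ b) * (p1 * p2) := by ring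
    rw [this]
    have h4 : (4:Int) ≤ p1 * p2 := by nlinarith
    nlinarith
  have hb1 : (0:Int) < p2 ^ (b+1) := pow_pos (by omega) _
  have ha2 : (0:Int) < p1 ^ a' := pow_pos (by omega) _
  nlinarith

theorem pvPowPairInj (p1 p2 : Int) (hp1 : 2 ≤ p1) (hp2 : 2 ≤ p2)
    (hpr1 : Prime p1) (hpr2 : Prime p2) (hne : p1 ≠ p2) :
    ∀ (a c b d : ℕ), p1 ^ a * p2 ^ b = p1 ^ c * p2 ^ d → a = c ∧ b = d := by
  have hdvd12 : ∀ e : ℕ, p1 ∣ p2 ^ e → False := by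
    intro e h
    exact hne (pvPrimeDvdPrime p1 p2 hp1 hp2 hpr1 hpr2 (hpr1.dvd_of_dvd_pow h))
  intro a
  induction a with
  | zero =>
    intro c b d h
    cases c with
    | zero =>
      simp only [pow_zero, one_mul] at h
      exact ⟨rfl, pvPowInjExp p2 hp2 h⟩
    | succ c =>
      exfalso
      apply hdvd12 b
      rw [show p2 ^ b = p1 ^ 0 * p2 ^ b by ring, h]
      exact Dvd.dvd.mul_right (dvd_pow_self p1 (Nat.succ_ne_zero c)) _
  | succ a ih =>
    intro c b d h
    cases c with
    | zero =>
      exfalso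
      apply hdvd12 d
      rw [show p2 ^ d = p1 ^ 0 * p2 ^ d by ring, ← h]
      exact Dvd.dvd.mul_right (dvd_pow_self p1 (Nat.succ_ne_zero a)) _
    | succ c =>
      have hc : p1 * (p1 ^ a * p2 ^ b) = p1 * (p1 ^ c * p2 ^ d) := by
        rw [show p1 * (p1 ^ a * p2 ^ b) = p1 ^ (a+1) * p2 ^ b by ring,
            show p1 * (p1 ^ c * p2 ^ d) = p1 ^ (c+1) * p2 ^ d by ring]
        exact h
      have := ih c b d (mul_left_cancel₀ (by omega) hc)
      omega

-- product of a list supported on {p1, p2}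
theorem pvProdCountTwo (p1 p2 : Int) (hne : p1 ≠ p2) :
    ∀ l : List Int, (∀ x ∈ l, x = p1 ∨ x = p2) →
      l.prod = p1 ^ (l.count p1) * p2 ^ (l.count p2) := by
  intro l
  induction l with
  | nil => intro _; simp
  | cons x xs ih =>
    intro h
    have hx := h x (by simp)
    have ht := ih (fun y hy => h y (by simp [hy]))
    rcases hx with rfl | rfl
    · rw [List.prod_cons, ht]
      rw [List.count_cons_self, List.count_cons_of_ne hne]
      ring
    · rw [List.prod_cons, ht]
      rw [List.count_cons_self, List.count_cons_of_ne (Ne.symm hne)]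
      ring

theorem pvProdCountOne (p : Int) :
    ∀ l : List Int, (∀ x ∈ l, x = p) →
      l.prod = p ^ l.length ∧ l.count p = l.length := by
  intro l
  induction l with
  | nil => intro _; simp
  | cons x xs ih =>
    intro h
    have hx := h x (by simp)
    have ht := ih (fun y hy => h y (by simp [hy]))
    subst hx
    constructor
    · rw [List.prod_cons, ht.1, List.length_cons]; ring
    · rw [List.count_cons_self, ht.2, List.length_cons]

-- master spec of the prime_factors inner loop
theorem pvPfLoopAux (p1 p2 : Int) : ∀ (k : ℕ) (n p : Int) (acc : List Int) (hp : 2 ≤ p),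
    (n - p).toNat ≤ k → 2 ≤ n → (∀ q : Int, 2 ≤ q → q < p → ¬ q ∣ n) →
    (pvPfLoop p1 p2 n p acc hp = [] ∧
      ∃ q : Int, Prime q ∧ 2 ≤ q ∧ q ∣ n ∧ q ≠ p1 ∧ q ≠ p2) ∨
    (∃ t : List Int, pvPfLoop p1 p2 n p acc hp = acc ++ t ∧ t ≠ [] ∧
      t.prod = n ∧ ∀ x ∈ t, 2 ≤ x ∧ Prime x) := by
  have base : ∀ (n p : Int) (acc : List Int) (hp : 2 ≤ p), 2 ≤ n → ¬ (p * p ≤ n) →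
      (∀ q : Int, 2 ≤ q → q < p → ¬ q ∣ n) →
      (∃ t : List Int, pvPfLoop p1 p2 n p acc hp = acc ++ t ∧ t ≠ [] ∧
        t.prod = n ∧ ∀ x ∈ t, 2 ≤ x ∧ Prime x) := by
    intro n p acc hp hn hguard hmin
    refine ⟨[n], ?_, by simp, by simp, ?_⟩
    · rw [pvPfLoop, dif_neg hguard]
    · intro x hx
      simp only [List.mem_singleton] at hx
      rw [hx]
      exact ⟨hn, pvIntPrimeResidual n p hn (by omega) (not_le.mp hguard) hmin⟩
  intro k
  induction k with
  | zero =>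
    intro n p acc hp hk hn hmin
    have hnp : n ≤ p := by omega
    have hguard : ¬ (p * p ≤ n) := by nlinarith
    exact Or.inr (base n p acc hp hn hguard hmin)
  | succ k ih =>
    intro n p acc hp hk hn hmin
    by_cases hguard : p * p ≤ n
    · have h2p : 2 * p ≤ p * p := by nlinarith
      by_cases hmod : PySem.Int.mod n p = 0
      · -- p divides n
        have hdvd : p ∣ n := (PySem.Int.mod_eq_zero_iff_dvd n p).mp hmod
        have hprime : Prime p := by
          apply pvIntPrimeOfMin p hp
          intro q hq hqp hqdvd
          exact hmin q hq hqp (hqdvd.trans hdvd)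
        by_cases hmem : p = p1 ∨ p = p2
        · -- recurse on n / p
          have hfd : PySem.Int.floordiv n p = n / p :=
            PySem.Int.floordiv_eq_ediv_of_pos (by omega)
          have hmul : n / p * p = n := Int.ediv_mul_cancel hdvd
          have hn' : 2 ≤ n / p := by
            have : p ≤ n / p := Int.le_ediv_of_mul_le (by omega) (by nlinarith)
            omega
          have hlt : n / p < n := Int.ediv_lt_of_lt_mul (by omega) (by nlinarith)
          have hk' : (n / p - p).toNat ≤ k := by omega
          have hmin' : ∀ q : Int, 2 ≤ q → q < p → ¬ q ∣ n / p := by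
            intro q hq hqp hqdvd
            exact hmin q hq hqp (hqdvd.trans ⟨p, hmul.symm ▸ rfl⟩)
          have step : pvPfLoop p1 p2 n p acc hp =
              pvPfLoop p1 p2 (PySem.Int.floordiv n p) p (acc ++ [p]) hp := by
            rw [pvPfLoop, dif_pos hguard, if_neg (by simpa using hmod), if_neg (not_not_intro hmem)]
          rcases ih (n / p) p (acc ++ [p]) hp hk' hn' hmin' with ⟨hres, q, hq⟩ | ⟨t, hres, hne, hprod, helem⟩
          · left
            refine ⟨by rw [step, hfd]; exact hres, q, hq.1, hq.2.1, ?_, hq.2.2.2⟩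
            exact hq.2.2.1.trans ⟨p, hmul.symm ▸ rfl⟩
          · right
            refine ⟨p :: t, ?_, by simp, ?_, ?_⟩
            · rw [step, hfd, hres]
              simp
            · rw [List.prod_cons, hprod, mul_comm]
              exact hmul
            · intro x hx
              rcases List.mem_cons.mp hx with rfl | hx
              · exact ⟨hp, hprime⟩
              · exact helem x hx
        · -- bail: p not one of the given primes
          left
          constructor
          · rw [pvPfLoop, dif_pos hguard, if_neg (by simpa using hmod), if_pos hmem]
          · exact ⟨p, hprime, hp, hdvd, fun h => hmem (Or.inl h), fun h => hmem (Or.inr h)⟩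
      · -- p does not divide n: try p + 1
        have step : pvPfLoop p1 p2 n p acc hp = pvPfLoop p1 p2 n (p + 1) acc (by omega) := by
          rw [pvPfLoop, dif_pos hguard, if_pos (by simpa using hmod)]
        have hk' : (n - (p + 1)).toNat ≤ k := by omega
        have hmin' : ∀ q : Int, 2 ≤ q → q < p + 1 → ¬ q ∣ n := by
          intro q hq hqp hqdvd
          rcases lt_or_eq_of_le (show q ≤ p by omega) with h | rfl
          · exact hmin q hq h hqdvd
          · exact hmod ((PySem.Int.mod_eq_zero_iff_dvd n q).mpr hqdvd)
        rw [step]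
        exact ih n (p + 1) acc (by omega) hk' hn hmin'
    · exact Or.inr (base n p acc hp hn hguard hmin)

theorem pvPfLoop_spec (p1 p2 : Int) (n p : Int) (acc : List Int) (hp : 2 ≤ p) (hn : 2 ≤ n)
    (hmin : ∀ q : Int, 2 ≤ q → q < p → ¬ q ∣ n) :
    (pvPfLoop p1 p2 n p acc hp = [] ∧
      ∃ q : Int, Prime q ∧ 2 ≤ q ∧ q ∣ n ∧ q ≠ p1 ∧ q ≠ p2) ∨
    (∃ t : List Int, pvPfLoop p1 p2 n p acc hp = acc ++ t ∧ t ≠ [] ∧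
      t.prod = n ∧ ∀ x ∈ t, 2 ≤ x ∧ Prime x) :=
  pvPfLoopAux p1 p2 (n - p).toNat n p acc hp le_rfl hn hmin
-- the Python test 'given_primes == set(pf)'
def pvCond (p1 p2 n : Int) : Bool :=
  PySem.Set.equal (PySem.Set.ofList [p1, p2]) (PySem.Set.ofList (pvPrimeFactors p1 p2 n))

theorem pvCond_mem (p1 p2 n : Int) :
    pvCond p1 p2 n = true ↔ ∀ x : Int, (x = p1 ∨ x = p2) ↔ x ∈ pvPrimeFactors p1 p2 n := by
  unfold pvCond
  rw [PySem.Set.equal_iff]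
  constructor <;> intro h x <;> have hx := h x <;>
    simp only [PySem.Set.mem_ofList, List.mem_cons,
      List.not_mem_nil, or_false] at hx ⊢ <;> tauto

theorem pvCond_core (p1 p2 n : Int) (hn : 1 ≤ n) (hC : pvCond p1 p2 n = true) :
    2 ≤ n ∧ (2 ≤ p1 ∧ Prime p1) ∧ (2 ≤ p2 ∧ Prime p2) ∧
    (pvPrimeFactors p1 p2 n).prod = n ∧
    (∀ x ∈ pvPrimeFactors p1 p2 n, x = p1 ∨ x = p2) ∧
    p1 ∈ pvPrimeFactors p1 p2 n ∧ p2 ∈ pvPrimeFactors p1 p2 n := by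
  have hmem := (pvCond_mem p1 p2 n).mp hC
  have hp1m : p1 ∈ pvPrimeFactors p1 p2 n := (hmem p1).mp (Or.inl rfl)
  have hp2m : p2 ∈ pvPrimeFactors p1 p2 n := (hmem p2).mp (Or.inr rfl)
  have hn2 : 2 ≤ n := by
    by_contra h
    have he : pvPrimeFactors p1 p2 n = [] := by
      unfold pvPrimeFactors; rw [if_pos (by omega)]
    rw [he] at hp1m
    simp at hp1m
  have hpf : pvPrimeFactors p1 p2 n = pvPfLoop p1 p2 n 2 [] (by omega) := by
    unfold pvPrimeFactors; rw [if_neg (by omega)]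
  rcases pvPfLoop_spec p1 p2 n 2 [] (by omega) hn2 (by intro q h1 h2 _; omega) with
    ⟨he, _⟩ | ⟨t, ht, _, hprod, helem⟩
  · rw [hpf, he] at hp1m; simp at hp1m
  · have hpft : pvPrimeFactors p1 p2 n = t := by rw [hpf, ht]; simp
    refine ⟨hn2, ?_, ?_, by rw [hpft]; exact hprod, fun x hx => (hmem x).mpr hx, hp1m, hp2m⟩
    · have := helem p1 (by rw [← hpft]; exact hp1m)
      exact ⟨this.1, this.2⟩
    · have := helem p2 (by rw [← hpft]; exact hp2m)
      exact ⟨this.1, this.2⟩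

theorem pvCond_rep_distinct (p1 p2 n : Int) (hne : p1 ≠ p2) (hn : 1 ≤ n)
    (hC : pvCond p1 p2 n = true) :
    n = p1 ^ ((pvPrimeFactors p1 p2 n).count p1) * p2 ^ ((pvPrimeFactors p1 p2 n).count p2) ∧
    1 ≤ (pvPrimeFactors p1 p2 n).count p1 ∧ 1 ≤ (pvPrimeFactors p1 p2 n).count p2 := by
  obtain ⟨_, _, _, hprod, helem, hm1, hm2⟩ := pvCond_core p1 p2 n hn hC
  refine ⟨?_, List.count_pos_iff.mpr hm1, List.count_pos_iff.mpr hm2⟩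
  exact hprod.symm.trans (pvProdCountTwo p1 p2 hne _ helem)

theorem pvCond_rep_equal (p1 n : Int) (hn : 1 ≤ n) (hC : pvCond p1 p1 n = true) :
    n = p1 ^ (pvPrimeFactors p1 p1 n).length ∧
    (pvPrimeFactors p1 p1 n).count p1 = (pvPrimeFactors p1 p1 n).length ∧
    1 ≤ (pvPrimeFactors p1 p1 n).length := by
  obtain ⟨_, _, _, hprod, helem, hm1, _⟩ := pvCond_core p1 p1 n hn hC
  have hall : ∀ x ∈ pvPrimeFactors p1 p1 n, x = p1 := by
    intro x hx; rcases helem x hx with h | h <;> exact h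
  obtain ⟨h1, h2⟩ := pvProdCountOne p1 _ hall
  exact ⟨hprod.symm.trans h1, h2, List.length_pos_iff.mpr (List.ne_nil_of_mem hm1)⟩

theorem pvCond_intro (p1 p2 : Int) (h1 : 2 ≤ p1) (h2 : 2 ≤ p2)
    (hpr1 : Prime p1) (hpr2 : Prime p2) (n : Int) (hn : 2 ≤ n)
    (hgood : ∀ q : Int, Prime q → 2 ≤ q → q ∣ n → q = p1 ∨ q = p2)
    (hd1 : p1 ∣ n) (hd2 : p2 ∣ n) :
    pvCond p1 p2 n = true := by
  have hpf : pvPrimeFactors p1 p2 n = pvPfLoop p1 p2 n 2 [] (by omega) := by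
    unfold pvPrimeFactors; rw [if_neg (by omega)]
  rcases pvPfLoop_spec p1 p2 n 2 [] (by omega) hn (by intro q hq1 hq2 _; omega) with
    ⟨_, q, hq⟩ | ⟨t, ht, htne, hprod, helem⟩
  · rcases hgood q hq.1 hq.2.1 hq.2.2.1 with h | h
    · exact absurd h hq.2.2.2.1
    · exact absurd h hq.2.2.2.2
  · have hpft : pvPrimeFactors p1 p2 n = t := by rw [hpf, ht]; simp
    have helem2 : ∀ x ∈ t, x = p1 ∨ x = p2 := by
      intro x hx
      have hd : x ∣ n := hprod ▸ List.dvd_prod hx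
      exact hgood x (helem x hx).2 (helem x hx).1 hd
    have hm1 : p1 ∈ t := by
      by_contra hnm
      have hall : ∀ x ∈ t, x = p2 := by
        intro x hx
        rcases helem2 x hx with h | h
        · exact absurd (h ▸ hx) hnm
        · exact h
      obtain ⟨hpr, _⟩ := pvProdCountOne p2 t hall
      have : p1 ∣ p2 ^ t.length := by rw [← hpr, hprod]; exact hd1
      have := pvPrimeDvdPrime p1 p2 h1 h2 hpr1 hpr2 (hpr1.dvd_of_dvd_pow this)
      rw [this] at hnm
      obtain ⟨x, hx⟩ := List.exists_mem_of_ne_nil t htne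
      exact hnm ((hall x hx) ▸ hx)
    have hm2 : p2 ∈ t := by
      by_contra hnm
      have hall : ∀ x ∈ t, x = p1 := by
        intro x hx
        rcases helem2 x hx with h | h
        · exact h
        · exact absurd (h ▸ hx) hnm
      obtain ⟨hpr, _⟩ := pvProdCountOne p1 t hall
      have : p2 ∣ p1 ^ t.length := by rw [← hpr, hprod]; exact hd2
      have := pvPrimeDvdPrime p2 p1 h2 h1 hpr2 hpr1 (hpr2.dvd_of_dvd_pow this)
      rw [this] at hnm
      obtain ⟨x, hx⟩ := List.exists_mem_of_ne_nil t htne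
      exact hnm ((hall x hx) ▸ hx)
    rw [pvCond_mem]
    intro x
    rw [hpft]
    constructor
    · intro hx; rcases hx with rfl | rfl
      · exact hm1
      · exact hm2
    · exact helem2 x
theorem pvIsPrimeLoopAux (n : Int) (hn : 2 ≤ n) : ∀ (k : ℕ) (d : Int) (hd : 2 ≤ d),
    (n - d).toNat ≤ k → (∀ q : Int, 2 ≤ q → q < d → ¬ q ∣ n) →
    (pvIsPrimeLoop n d hd = true ↔ Prime n) := by
  have base : ∀ (d : Int) (hd : 2 ≤ d), ¬ (d * d ≤ n) →
      (∀ q : Int, 2 ≤ q → q < d → ¬ q ∣ n) → (pvIsPrimeLoop n d hd = true ↔ Prime n) := by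
    intro d hd hguard hmin
    have hpr : Prime n := pvIntPrimeResidual n d hn (by omega) (not_le.mp hguard) hmin
    rw [pvIsPrimeLoop, dif_neg hguard]
    exact iff_of_true rfl hpr
  intro k
  induction k with
  | zero =>
    intro d hd hk hmin
    have hnd : n ≤ d := by omega
    exact base d hd (by nlinarith) hmin
  | succ k ih =>
    intro d hd hk hmin
    by_cases hguard : d * d ≤ n
    · have h2d : 2 * d ≤ d * d := by nlinarith
      by_cases hmod : PySem.Int.mod n d = 0
      · have hdvd : d ∣ n := (PySem.Int.mod_eq_zero_iff_dvd n d).mp hmod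
        have hdn : d < n := by omega
        rw [pvIsPrimeLoop, dif_pos hguard, if_pos hmod]
        refine iff_of_false (by simp) ?_
        intro hpr
        have h1 : d.natAbs ∣ n.natAbs := Int.natAbs_dvd_natAbs.mpr hdvd
        have h2 := (Int.prime_iff_natAbs_prime.mp hpr).eq_one_or_self_of_dvd _ h1
        omega
      · rw [pvIsPrimeLoop, dif_pos hguard, if_neg hmod]
        apply ih (d + 1) (by omega) (by omega)
        intro q hq hqd hqdvd
        rcases lt_or_eq_of_le (show q ≤ d by omega) with h | rfl
        · exact hmin q hq h hqdvd
        · exact hmod ((PySem.Int.mod_eq_zero_iff_dvd n q).mpr hqdvd)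
    · exact base d hd hguard hmin

theorem pvIsPrime_iff (n : Int) : pvIsPrime n = true ↔ (2 ≤ n ∧ Prime n) := by
  unfold pvIsPrime
  by_cases h : n < 2
  · rw [if_pos h]
    exact iff_of_false (by simp) (by omega)
  · rw [if_neg h]
    have := pvIsPrimeLoopAux n (by omega) (n - 2).toNat 2 (by omega) le_rfl
      (by intro q h1 h2 _; omega)
    rw [this]
    exact ⟨fun hp => ⟨by omega, hp⟩, fun hp => hp.2⟩
theorem pvCond_eq (p1 p2 n : Int) :
    PySem.Set.equal (PySem.Set.ofList [p1, p2]) (PySem.Set.ofList (pvPrimeFactors p1 p2 n)) =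
      pvCond p1 p2 n := rfl

theorem pvALoop_none (p1 p2 : Int) :
    ∀ (k : ℕ) (e : Int), e.toNat ≤ k →
    (∀ m : Int, 0 < m → m ≤ e → ¬ pvCond p1 p2 m = true) →
    pvALoop p1 p2 (PySem.List.pyRange e 0 (-1)) 0 0 0 = none := by
  intro k
  induction k with
  | zero =>
    intro e hk h
    rw [PySem.List.pyRange_neg_one_eq_nil (by omega)]
    rfl
  | succ k ih =>
    intro e hk h
    by_cases he : 0 < e
    · rw [PySem.List.pyRange_neg_one_cons he]
      have hC : pvCond p1 p2 e = false := by
        have := h e he le_rfl; simpa using this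
      simp only [pvALoop, pvCond_eq, hC, Bool.false_eq_true, if_false, Int.toNat_zero,
        pow_zero, mul_one]
      rw [if_neg (by omega)]
      exact ih (e - 1) (by omega) (fun m hm1 hm2 => h m hm1 (by omega))
    · rw [PySem.List.pyRange_neg_one_eq_nil (by omega)]
      rfl
theorem pvALoop_ret (p1 p2 n0 : Int) (hne : p1 ≠ p2) (hn0 : 0 < n0)
    (hC : pvCond p1 p2 n0 = true) :
    pvALoop p1 p2 (PySem.List.pyRange (n0 - 1) 0 (-1))
      ((pvPrimeFactors p1 p2 n0).count p1 : Int) ((pvPrimeFactors p1 p2 n0).count p2 : Int) n0 =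
    some [n0, ((pvPrimeFactors p1 p2 n0).count p1 : Int), ((pvPrimeFactors p1 p2 n0).count p2 : Int)] := by
  obtain ⟨hn2, ⟨hp1, hpr1⟩, ⟨hp2, hpr2⟩, _, _, _, _⟩ := pvCond_core p1 p2 n0 (by omega) hC
  obtain ⟨hrep, hc1, hc2⟩ := pvCond_rep_distinct p1 p2 n0 hne (by omega) hC
  set c1 := (pvPrimeFactors p1 p2 n0).count p1 with hc1def
  set c2 := (pvPrimeFactors p1 p2 n0).count p2 with hc2def
  have hpow : p1 ^ ((c1 : Int)).toNat * p2 ^ ((c2 : Int)).toNat = n0 := by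
    simp only [Int.toNat_natCast]
    exact hrep.symm
  have hpos : 0 < n0 - 1 := by
    have h1 : p1 ≤ p1 ^ c1 := le_self_pow₀ (by omega) (by omega)
    have h2 : p2 ≤ p2 ^ c2 := le_self_pow₀ (by omega) (by omega)
    nlinarith
  rw [PySem.List.pyRange_neg_one_cons hpos]
  simp only [pvALoop, pvCond_eq]
  by_cases hC' : pvCond p1 p2 (n0 - 1) = true
  · obtain ⟨hrep', hc1', hc2'⟩ := pvCond_rep_distinct p1 p2 (n0 - 1) hne (by omega) hC'
    have hupd : ¬ (((pvPrimeFactors p1 p2 (n0 - 1)).count p1 : Int) > (c1 : Int) ∧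
        ((pvPrimeFactors p1 p2 (n0 - 1)).count p2 : Int) > (c2 : Int)) := by
      rintro ⟨h1, h2⟩
      have := pvPowPairLt p1 p2 hp1 hp2 (show c1 < (pvPrimeFactors p1 p2 (n0 - 1)).count p1 by exact_mod_cast h1)
        (show c2 < (pvPrimeFactors p1 p2 (n0 - 1)).count p2 by exact_mod_cast h2)
      omega
    simp only [hC', if_true]
    rw [if_neg hupd, if_pos (by rw [hpow]; omega)]
  · rw [Bool.not_eq_true] at hC'
    simp only [hC', Bool.false_eq_true, if_false]
    rw [if_pos (by rw [hpow]; omega)]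
theorem pvALoop_found (p1 p2 n0 : Int) (hn0 : 0 < n0) (hC : pvCond p1 p2 n0 = true) :
    ∀ (k : ℕ) (e : Int), n0 ≤ e → (e - n0).toNat ≤ k →
    (∀ m : Int, n0 < m → m ≤ e → ¬ pvCond p1 p2 m = true) →
    pvALoop p1 p2 (PySem.List.pyRange e 0 (-1)) 0 0 0 =
      some [n0, ((pvPrimeFactors p1 p2 n0).count p1 : Int),
        ((pvPrimeFactors p1 p2 n0).count p2 : Int)] := by
  have hbase : pvALoop p1 p2 (PySem.List.pyRange n0 0 (-1)) 0 0 0 =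
      some [n0, ((pvPrimeFactors p1 p2 n0).count p1 : Int),
        ((pvPrimeFactors p1 p2 n0).count p2 : Int)] := by
    obtain ⟨hn2, ⟨hp1, hpr1⟩, ⟨hp2, hpr2⟩, _, _, hm1, hm2⟩ :=
      pvCond_core p1 p2 n0 (by omega) hC
    have hc1 : 1 ≤ (pvPrimeFactors p1 p2 n0).count p1 := List.count_pos_iff.mpr hm1
    have hc2 : 1 ≤ (pvPrimeFactors p1 p2 n0).count p2 := List.count_pos_iff.mpr hm2
    have hcpos : (((pvPrimeFactors p1 p2 n0).count p1 : Int) > 0 ∧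
        ((pvPrimeFactors p1 p2 n0).count p2 : Int) > 0) := by
      constructor <;> [exact_mod_cast hc1; exact_mod_cast hc2]
    rw [PySem.List.pyRange_neg_one_cons hn0]
    simp only [pvALoop, pvCond_eq, hC, if_true, if_pos hcpos]
    by_cases hne : p1 = p2
    · subst hne
      obtain ⟨hrep, hcnt, hlen⟩ := pvCond_rep_equal p1 n0 (by omega) hC
      have hsq : p1 ^ ((((pvPrimeFactors p1 p1 n0).count p1 : Int)).toNat) *
          p1 ^ ((((pvPrimeFactors p1 p1 n0).count p1 : Int)).toNat) = n0 * n0 := by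
        simp only [Int.toNat_natCast, hcnt]
        rw [← hrep]
      rw [if_pos (by rw [hsq]; nlinarith)]
    · obtain ⟨hrep, _, _⟩ := pvCond_rep_distinct p1 p2 n0 hne (by omega) hC
      have hpow : p1 ^ (((pvPrimeFactors p1 p2 n0).count p1 : Int)).toNat *
          p2 ^ (((pvPrimeFactors p1 p2 n0).count p2 : Int)).toNat = n0 := by
        simp only [Int.toNat_natCast]
        exact hrep.symm
      rw [if_neg (by rw [hpow]; omega)]
      exact pvALoop_ret p1 p2 n0 hne hn0 hC
  intro k
  induction k with
  | zero =>
    intro e hle hk hmax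
    have : e = n0 := by omega
    subst this
    exact hbase
  | succ k ih =>
    intro e hle hk hmax
    rcases eq_or_lt_of_le hle with rfl | hlt
    · exact hbase
    · have hCe : pvCond p1 p2 e = false := by
        have := hmax e hlt le_rfl; simpa using this
      rw [PySem.List.pyRange_neg_one_cons (by omega)]
      simp only [pvALoop, pvCond_eq, hCe, Bool.false_eq_true, if_false, Int.toNat_zero,
        pow_zero, mul_one]
      rw [if_neg (by omega)]
      exact ih (e - 1) (by omega) (by omega) (fun m h1 h2 => hmax m h1 (by omega))
-- "o is the running maximum over the exponent pairs X" invariant of B's loops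
def pvIsBest (p1 p2 : Int) (o : Option (List Int)) (X : ℕ → ℕ → Prop) : Prop :=
  (o = none ∧ ∀ i j, ¬ X i j) ∨
  (∃ i j : ℕ, o = some [p1 ^ i * p2 ^ j, (i : Int), (j : Int)] ∧ X i j ∧
    ∀ i' j', X i' j' → p1 ^ i' * p2 ^ j' ≤ p1 ^ i * p2 ^ j)

theorem pvIsBest_congr {p1 p2 : Int} {o : Option (List Int)} {X Y : ℕ → ℕ → Prop}
    (h : pvIsBest p1 p2 o X) (hxy : ∀ i j, X i j ↔ Y i j) : pvIsBest p1 p2 o Y := by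
  rcases h with ⟨ho, hX⟩ | ⟨i, j, ho, hX, hmax⟩
  · exact Or.inl ⟨ho, fun i j hY => hX i j ((hxy i j).mpr hY)⟩
  · exact Or.inr ⟨i, j, ho, (hxy i j).mp hX, fun i' j' hY => hmax i' j' ((hxy i' j').mpr hY)⟩

theorem pvBInner_spec (p1 p2 end_ : Int) (hp1 : 2 ≤ p1) (hp2 : 2 ≤ p2) :
    ∀ (k : ℕ) (a0 b0 : ℕ) (v : Int) (best : Option (List Int)) (hv : 1 ≤ v),
      v = p1 ^ a0 * p2 ^ b0 → 1 ≤ b0 → ∀ (X : ℕ → ℕ → Prop),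
      (end_ + 1 - v).toNat ≤ k → pvIsBest p1 p2 best X →
      pvIsBest p1 p2 (pvBInner p2 end_ (a0 : Int) v (b0 : Int) best hp2 hv)
        (fun i j => X i j ∨ (i = a0 ∧ b0 ≤ j ∧ p1 ^ i * p2 ^ j ≤ end_)) := by
  intro k
  induction k with
  | zero =>
    intro a0 b0 v best hv hveq hb0 X hk hbest
    have hg : ¬ (v ≤ end_) := by omega
    rw [pvBInner.eq_def, dif_neg hg]
    apply pvIsBest_congr hbest
    intro i j
    constructor
    · exact Or.inl
    · rintro (h | ⟨rfl, hbj, hle⟩)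
      · exact h
      · exfalso
        have h1 : p2 ^ b0 ≤ p2 ^ j := pow_le_pow_right₀ (by omega) hbj
        have h2 : (0:Int) < p1 ^ i := pow_pos (by omega) _
        nlinarith [hveq]
  | succ k ih =>
    intro a0 b0 v best hv hveq hb0 X hk hbest
    by_cases hg : v ≤ end_
    · have hiff : ∀ i j : ℕ,
          ((X i j ∨ (i = a0 ∧ j = b0)) ∨ (i = a0 ∧ b0 + 1 ≤ j ∧ p1 ^ i * p2 ^ j ≤ end_)) ↔
          (X i j ∨ (i = a0 ∧ b0 ≤ j ∧ p1 ^ i * p2 ^ j ≤ end_)) := by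
        intro i j
        constructor
        · rintro ((h | ⟨rfl, rfl⟩) | ⟨rfl, hbj, hle⟩)
          · exact Or.inl h
          · exact Or.inr ⟨rfl, le_rfl, by rw [← hveq]; exact hg⟩
          · exact Or.inr ⟨rfl, by omega, hle⟩
        · rintro (h | ⟨rfl, hbj, hle⟩)
          · exact Or.inl (Or.inl h)
          · rcases eq_or_lt_of_le hbj with rfl | hlt
            · exact Or.inl (Or.inr ⟨rfl, rfl⟩)
            · exact Or.inr ⟨rfl, by omega, hle⟩
      have hk' : (end_ + 1 - v * p2).toNat ≤ k := by
        have h2 : v + 1 ≤ v * p2 := by nlinarith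
        omega
      have hveq' : v * p2 = p1 ^ a0 * p2 ^ (b0 + 1) := by rw [hveq, pow_succ]; ring
      have hcast : ((b0 : Int) + 1) = ((b0 + 1 : ℕ) : Int) := by push_cast; ring
      rcases hbest with ⟨ho, hX⟩ | ⟨i, j, ho, hX, hmax⟩
      · subst ho
        rw [pvBInner.eq_def, dif_pos hg]
        have hstep : pvIsBest p1 p2 (some [v, (a0 : Int), (b0 : Int)])
            (fun i j => X i j ∨ (i = a0 ∧ j = b0)) := by
          refine Or.inr ⟨a0, b0, by rw [hveq], Or.inr ⟨rfl, rfl⟩, ?_⟩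
          rintro i' j' (h | ⟨rfl, rfl⟩)
          · exact absurd h (hX i' j')
          · exact le_rfl
        rw [hcast]
        exact pvIsBest_congr
          (ih a0 (b0 + 1) (v * p2) _ (by nlinarith) hveq' (by omega) _ hk' hstep) hiff
      · subst ho
        rw [pvBInner.eq_def, dif_pos hg]
        simp only [List.headD_cons]
        by_cases hgt : v > p1 ^ i * p2 ^ j
        · rw [if_pos hgt]
          have hstep : pvIsBest p1 p2 (some [v, (a0 : Int), (b0 : Int)])
              (fun i' j' => X i' j' ∨ (i' = a0 ∧ j' = b0)) := by
            refine Or.inr ⟨a0, b0, by rw [hveq], Or.inr ⟨rfl, rfl⟩, ?_⟩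
            rintro i' j' (h | ⟨rfl, rfl⟩)
            · have := hmax i' j' h
              rw [← hveq]
              omega
            · rw [← hveq]
          rw [hcast]
          exact pvIsBest_congr
            (ih a0 (b0 + 1) (v * p2) _ (by nlinarith) hveq' (by omega) _ hk' hstep) hiff
        · rw [if_neg hgt]
          have hstep : pvIsBest p1 p2 (some [p1 ^ i * p2 ^ j, (i : Int), (j : Int)])
              (fun i' j' => X i' j' ∨ (i' = a0 ∧ j' = b0)) := by
            refine Or.inr ⟨i, j, rfl, Or.inl hX, ?_⟩
            rintro i' j' (h | ⟨rfl, rfl⟩)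
            · exact hmax i' j' h
            · rw [← hveq]; omega
          rw [hcast]
          exact pvIsBest_congr
            (ih a0 (b0 + 1) (v * p2) _ (by nlinarith) hveq' (by omega) _ hk' hstep) hiff
    · rw [pvBInner.eq_def, dif_neg hg]
      apply pvIsBest_congr hbest
      intro i j
      constructor
      · exact Or.inl
      · rintro (h | ⟨rfl, hbj, hle⟩)
        · exact h
        · exfalso
          have h1 : p2 ^ b0 ≤ p2 ^ j := pow_le_pow_right₀ (by omega) hbj
          have h2 : (0:Int) < p1 ^ i := pow_pos (by omega) _
          nlinarith [hveq]
theorem pvBOuter_spec (p1 p2 end_ : Int) (hp1 : 2 ≤ p1) (hp2 : 2 ≤ p2) :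
    ∀ (k : ℕ) (a0 : ℕ) (pa : Int) (best : Option (List Int)) (hpa : 1 ≤ pa),
      pa = p1 ^ a0 → 1 ≤ a0 → ∀ (X : ℕ → ℕ → Prop),
      (end_ + 1 - pa).toNat ≤ k → pvIsBest p1 p2 best X →
      pvIsBest p1 p2 (pvBOuter p1 p2 end_ pa (a0 : Int) best hp1 hp2 hpa)
        (fun i j => X i j ∨ (a0 ≤ i ∧ 1 ≤ j ∧ p1 ^ i * p2 ^ j ≤ end_)) := by
  have hempty : ∀ (pa : Int) (a0 : ℕ), pa = p1 ^ a0 → ¬ (pa ≤ end_) →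
      ∀ i j : ℕ, a0 ≤ i → 1 ≤ j → ¬ (p1 ^ i * p2 ^ j ≤ end_) := by
    intro pa a0 hpaeq hg i j hai hj hle
    have h1 : p1 ^ a0 ≤ p1 ^ i := pow_le_pow_right₀ (by omega) hai
    have h2 : p2 ≤ p2 ^ j := le_self_pow₀ (by omega) (by omega)
    have h3 : (0:Int) < p1 ^ i := pow_pos (by omega) _
    nlinarith
  intro k
  induction k with
  | zero =>
    intro a0 pa best hpa hpaeq ha0 X hk hbest
    have hg : ¬ (pa ≤ end_) := by omega
    rw [pvBOuter.eq_def, dif_neg hg]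
    apply pvIsBest_congr hbest
    intro i j
    constructor
    · exact Or.inl
    · rintro (h | ⟨hai, hj, hle⟩)
      · exact h
      · exact absurd hle (hempty pa a0 hpaeq hg i j hai hj)
  | succ k ih =>
    intro a0 pa best hpa hpaeq ha0 X hk hbest
    by_cases hg : pa ≤ end_
    · rw [pvBOuter.eq_def, dif_pos hg]
      have hinner := pvBInner_spec p1 p2 end_ hp1 hp2 (end_ + 1 - pa * p2).toNat a0 1
        (pa * p2) best (by nlinarith) (by rw [hpaeq, pow_one]) le_rfl X le_rfl hbest
      have hk' : (end_ + 1 - pa * p1).toNat ≤ k := by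
        have h2 : pa + 1 ≤ pa * p1 := by nlinarith
        omega
      have hcast : ((a0 : Int) + 1) = ((a0 + 1 : ℕ) : Int) := by push_cast; ring
      rw [hcast]
      have hrec := ih (a0 + 1) (pa * p1) _ (by nlinarith)
        (by rw [hpaeq, pow_succ]) (by omega) _ hk' hinner
      apply pvIsBest_congr hrec
      intro i j
      constructor
      · rintro ((h | ⟨rfl, hbj, hle⟩) | ⟨hai, hj, hle⟩)
        · exact Or.inl h
        · exact Or.inr ⟨le_rfl, hbj, hle⟩
        · exact Or.inr ⟨by omega, hj, hle⟩
      · rintro (h | ⟨hai, hj, hle⟩)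
        · exact Or.inl (Or.inl h)
        · rcases eq_or_lt_of_le hai with rfl | hlt
          · exact Or.inl (Or.inr ⟨rfl, hj, hle⟩)
          · exact Or.inr ⟨by omega, hj, hle⟩
    · rw [pvBOuter.eq_def, dif_neg hg]
      apply pvIsBest_congr hbest
      intro i j
      constructor
      · exact Or.inl
      · rintro (h | ⟨hai, hj, hle⟩)
        · exact h
        · exact absurd hle (hempty pa a0 hpaeq hg i j hai hj)

theorem pvPowLoop_spec (p end_ : Int) (hp : 2 ≤ p) :
    ∀ (k : ℕ) (e0 : ℕ) (v : Int) (hv : 1 ≤ v), v = p ^ e0 → v ≤ end_ →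
      (end_ + 1 - v).toNat ≤ k →
      ∃ K : ℕ, e0 ≤ K ∧ pvPowLoop p end_ v (e0 : Int) hp hv = (p ^ K, (K : Int)) ∧
        p ^ K ≤ end_ ∧ end_ < p ^ (K + 1) := by
  intro k
  induction k with
  | zero =>
    intro e0 v hv hveq hvle hk
    exfalso
    omega
  | succ k ih =>
    intro e0 v hv hveq hvle hk
    by_cases hg : v * p ≤ end_
    · rw [pvPowLoop, dif_pos hg]
      have hcast : ((e0 : Int) + 1) = ((e0 + 1 : ℕ) : Int) := by push_cast; ring
      rw [hcast]
      obtain ⟨K, hK1, hK2, hK3, hK4⟩ := ih (e0 + 1) (v * p) (by nlinarith)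
        (by rw [hveq, pow_succ]) hg
        (by have h2 : v + 1 ≤ v * p := by nlinarith
            omega)
      exact ⟨K, by omega, hK2, hK3, hK4⟩
    · rw [pvPowLoop, dif_neg hg]
      refine ⟨e0, le_rfl, by rw [hveq], by rw [← hveq]; exact hvle, ?_⟩
      rw [pow_succ, ← hveq]
      omega
theorem pvMain (p1 p2 end_ : Int) :
    highest_biPrimefac p1 p2 end_ = highest_biPrimefac_alt p1 p2 end_ := by
  unfold highest_biPrimefac highest_biPrimefac_alt
  by_cases hpr : (pvIsPrime p1 && pvIsPrime p2) = true
  · obtain ⟨h1, hpr1⟩ := (pvIsPrime_iff p1).mp ((Bool.and_eq_true _ _).mp hpr).1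
    obtain ⟨h2, hpr2⟩ := (pvIsPrime_iff p2).mp ((Bool.and_eq_true _ _).mp hpr).2
    rw [dif_pos hpr]
    by_cases heq : p1 = p2
    · subst heq
      rw [if_pos rfl]
      by_cases hgt : p1 > end_
      · rw [if_pos hgt]
        apply pvALoop_none p1 p1 end_.toNat end_ le_rfl
        intro m hm1 hm2 hC
        obtain ⟨hrep, _, hlen⟩ := pvCond_rep_equal p1 m (by omega) hC
        have hple : p1 ≤ p1 ^ (pvPrimeFactors p1 p1 m).length :=
          le_self_pow₀ (by omega) (by omega)
        omega
      · rw [if_neg hgt]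
        generalize hgen : pvPowLoop p1 end_ p1 1 _ _ = va
        obtain ⟨K, hK1, hK2, hK3, hK4⟩ := pvPowLoop_spec p1 end_ h1
          (end_ + 1 - p1).toNat 1 p1 (by omega) (by rw [pow_one]) (by omega) le_rfl
        have hva : va = (p1 ^ K, (K : Int)) := by rw [← hgen]; exact hK2
        rw [hva]
        have hn0 : (0:Int) < p1 ^ K := pow_pos (by omega) _
        have hCn0 : pvCond p1 p1 (p1 ^ K) = true := by
          apply pvCond_intro p1 p1 h1 h1 hpr1 hpr1 _ (by
            have : p1 ≤ p1 ^ K := le_self_pow₀ (by omega) (by omega)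
            omega)
          · intro q hq hq2 hqd
            have := pvPrimeDvdPrime q p1 hq2 h1 hq hpr1 (hq.dvd_of_dvd_pow hqd)
            exact Or.inl this
          · exact dvd_pow_self p1 (by omega)
          · exact dvd_pow_self p1 (by omega)
        have hA := pvALoop_found p1 p1 (p1 ^ K) hn0 hCn0 (end_ - p1 ^ K).toNat end_
          hK3 le_rfl (by
            intro m hm1 hm2 hC
            obtain ⟨hrep, _, hlen⟩ := pvCond_rep_equal p1 m (by omega) hC
            have hlt : p1 ^ (pvPrimeFactors p1 p1 m).length < p1 ^ (K + 1) := by omega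
            have hle : (pvPrimeFactors p1 p1 m).length ≤ K := by
              by_contra hcon
              have := pow_le_pow_right₀ (show (1:Int) ≤ p1 by omega)
                (show K + 1 ≤ (pvPrimeFactors p1 p1 m).length by omega)
              omega
            have := pow_le_pow_right₀ (show (1:Int) ≤ p1 by omega) hle
            omega)
        rw [hA]
        obtain ⟨hrep, hcnt, hlen⟩ := pvCond_rep_equal p1 (p1 ^ K) (by omega) hCn0
        have hKeq : (pvPrimeFactors p1 p1 (p1 ^ K)).length = K :=
          pvPowInjExp p1 h1 hrep.symm
        rw [hcnt, hKeq]
    · rw [if_neg heq]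
      generalize hgen : pvBOuter p1 p2 end_ p1 1 none _ _ _ = res
      have hbest0 : pvIsBest p1 p2 none (fun _ _ => False) := Or.inl ⟨rfl, by simp⟩
      have hB : pvIsBest p1 p2 res
          (fun i j => False ∨ (1 ≤ i ∧ 1 ≤ j ∧ p1 ^ i * p2 ^ j ≤ end_)) := by
        rw [← hgen]
        exact pvBOuter_spec p1 p2 end_ h1 h2 (end_ + 1 - p1).toNat 1 p1 none (by omega)
          (by rw [pow_one]) le_rfl _ le_rfl hbest0
      have hgood : ∀ (i j : ℕ), 1 ≤ i → 1 ≤ j →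
          ∀ q : Int, Prime q → 2 ≤ q → q ∣ p1 ^ i * p2 ^ j → q = p1 ∨ q = p2 := by
        intro i j hi hj q hq hq2 hqd
        rcases (Prime.dvd_mul hq).mp hqd with h | h
        · exact Or.inl (pvPrimeDvdPrime q p1 hq2 h1 hq hpr1 (hq.dvd_of_dvd_pow h))
        · exact Or.inr (pvPrimeDvdPrime q p2 hq2 h2 hq hpr2 (hq.dvd_of_dvd_pow h))
      rcases hB with ⟨hres, hX⟩ | ⟨i, j, hres, hXij, hmax⟩
      · rw [hres]
        apply pvALoop_none p1 p2 end_.toNat end_ le_rfl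
        intro m hm1 hm2 hC
        obtain ⟨hrep, hc1, hc2⟩ := pvCond_rep_distinct p1 p2 m heq (by omega) hC
        exact hX _ _ (Or.inr ⟨hc1, hc2, by omega⟩)
      · rw [hres]
        obtain ⟨hi, hj, hle⟩ : 1 ≤ i ∧ 1 ≤ j ∧ p1 ^ i * p2 ^ j ≤ end_ := by
          rcases hXij with h | h
          · exact absurd h (by simp)
          · exact h
        have hn0 : (0:Int) < p1 ^ i * p2 ^ j :=
          mul_pos (pow_pos (by omega) _) (pow_pos (by omega) _)
        have hCn0 : pvCond p1 p2 (p1 ^ i * p2 ^ j) = true := by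
          apply pvCond_intro p1 p2 h1 h2 hpr1 hpr2 _ (by
            have ha : p1 ≤ p1 ^ i := le_self_pow₀ (by omega) (by omega)
            have hb : p2 ≤ p2 ^ j := le_self_pow₀ (by omega) (by omega)
            nlinarith)
          · exact hgood i j hi hj
          · exact dvd_mul_of_dvd_left (dvd_pow_self p1 (by omega)) _
          · exact dvd_mul_of_dvd_right (dvd_pow_self p2 (by omega)) _
        have hA := pvALoop_found p1 p2 (p1 ^ i * p2 ^ j) hn0 hCn0
          (end_ - p1 ^ i * p2 ^ j).toNat end_ hle le_rfl (by
            intro m hm1 hm2 hC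
            obtain ⟨hrep, hc1, hc2⟩ := pvCond_rep_distinct p1 p2 m heq (by omega) hC
            have := hmax _ _ (Or.inr ⟨hc1, hc2, by omega⟩)
            omega)
        rw [hA]
        obtain ⟨hrep, hc1, hc2⟩ :=
          pvCond_rep_distinct p1 p2 (p1 ^ i * p2 ^ j) heq (by omega) hCn0
        obtain ⟨hie, hje⟩ := pvPowPairInj p1 p2 h1 h2 hpr1 hpr2 heq _ _ _ _ hrep.symm
        rw [hie, hje]
  · rw [dif_neg hpr]
    apply pvALoop_none p1 p2 end_.toNat end_ le_rfl
    intro m hm1 hm2 hC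
    obtain ⟨_, ⟨ha1, ha2⟩, ⟨hb1, hb2⟩, _, _, _, _⟩ := pvCond_core p1 p2 m (by omega) hC
    exact hpr (by
      rw [Bool.and_eq_true]
      exact ⟨(pvIsPrime_iff p1).mpr ⟨ha1, ha2⟩, (pvIsPrime_iff p2).mpr ⟨hb1, hb2⟩⟩)
-- ===== VERDICT (by name: the statement is the Claim_ definition above) =====
theorem highest_biPrimefac_spec : Claim_equal_highest_biPrimefac := by
  intro p1 p2 end_ _
  exact pvMain p1 p2 end_
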